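-- pv_equiv track=rewrite | github.com/intell-sci-comput/RSRM | model/msdb/msdb.py | process_symbol
-- ===== SOURCE A (Python) =====
-- from typing import List, Counter, Set, Tuple
--
-- def process_symbol(symbol: str) -> Set[str]:
--     """
--     Split a symbol expression into sub-expressions using '+' '-'
--     :param symbol: expression
--     :return: collection of subexpressions
--     """
--     symbols = []
--     now = ""
--     quote = 0
--     for s in symbol:
--         if s in '({[':
--             quote += 1
--         if s in ')}]':
--             quote -= 1
--         if s in '+-' and 0 == quote:
--             symbols.append(now)
--             now = ""
--         if s not in ' ':
--             now += s
--     symbols.append(now)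
--     return set(map(lambda x: x[1:] if x.startswith('+') else x, symbols))
-- ===== SOURCE B (Python) =====
-- def process_symbol(symbol: str):
--     """Two-pass split: record top-level '+'/'-' cut indices, then slice and clean."""
--     depth = 0
--     cuts = []
--     for i, ch in enumerate(symbol):
--         if ch in '({[':
--             depth += 1
--         elif ch in ')}]':
--             depth -= 1
--         elif ch in '+-' and depth == 0:
--             cuts.append(i)
--     segs = []
--     prev = 0
--     for c in cuts:
--         segs.append(symbol[prev:c])
--         prev = c
--     segs.append(symbol[prev:])
--     cleaned = (seg.replace(' ', '') for seg in segs)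
--     return {s[1:] if s.startswith('+') else s for s in cleaned}
-- ===== Notes on version B (the rewrite author's own statement) =====
-- stated objective: alternative
-- what changed: Replaces A's single stateful scan that mutates a current-segment buffer by a two-pass method: first record the indices of all top-level plus/minus operators, then slice the original string at those indices and clean each slice (remove spaces, strip a leading plus sign) independently.
import Mathlib
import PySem

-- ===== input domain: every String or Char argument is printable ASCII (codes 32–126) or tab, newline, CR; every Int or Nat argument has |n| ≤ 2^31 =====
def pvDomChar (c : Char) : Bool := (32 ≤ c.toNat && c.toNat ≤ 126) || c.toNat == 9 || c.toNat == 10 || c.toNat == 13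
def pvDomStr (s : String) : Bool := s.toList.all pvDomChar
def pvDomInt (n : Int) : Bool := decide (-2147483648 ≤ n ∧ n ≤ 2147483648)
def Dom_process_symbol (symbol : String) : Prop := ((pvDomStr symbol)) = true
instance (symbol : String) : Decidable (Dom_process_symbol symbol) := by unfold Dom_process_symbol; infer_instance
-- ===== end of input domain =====

-- B replaces A's single stateful scan by a two-pass cut-index-then-slice method (alternative decomposition, same cost).
-- ===== PORT A =====
-- loop body of A's for-loop; state = (symbols, now, quote)
def psA_step (st : List (List Char) × List Char × Int) (s : Char) : List (List Char) × List Char × Int :=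
  let quote := if s = '(' ∨ s = '{' ∨ s = '[' then st.2.2 + 1 else st.2.2
  let quote := if s = ')' ∨ s = '}' ∨ s = ']' then quote - 1 else quote
  let symbols := if (s = '+' ∨ s = '-') ∧ 0 = quote then st.1 ++ [st.2.1] else st.1
  let now0 : List Char := if (s = '+' ∨ s = '-') ∧ 0 = quote then [] else st.2.1
  let now := if s ≠ ' ' then now0 ++ [s] else now0
  (symbols, now, quote)

def process_symbol (symbol : String) : List String :=
  let st := symbol.toList.foldl psA_step ([], [], 0)
  PySem.Set.ofList ((st.1 ++ [st.2.1]).map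
    (fun x => if x.head? = some '+' then String.mk x.tail else String.mk x))

-- ===== PORT B =====
-- loop body of B's first pass; state = (depth, cuts)
def psB_cutStep (st : Int × List Int) (p : Int × Char) : Int × List Int :=
  if p.2 = '(' ∨ p.2 = '{' ∨ p.2 = '[' then (st.1 + 1, st.2)
  else if p.2 = ')' ∨ p.2 = '}' ∨ p.2 = ']' then (st.1 - 1, st.2)
  else if (p.2 = '+' ∨ p.2 = '-') ∧ st.1 = 0 then (st.1, st.2 ++ [p.1])
  else st

-- B's second pass: slice at the cut indices (prev pointer), final segment symbol[prev:]
def psB_slices (l : List Char) (prev : Int) : List Int → List (List Char)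
  | [] => [PySem.List.slice l (some prev) none]
  | c :: rest => PySem.List.slice l (some prev) (some c) :: psB_slices l c rest

-- seg.replace(' ', '') then strip one leading '+'
def psB_clean (seg : List Char) : String :=
  let s := seg.filter (fun c => c ≠ ' ')
  if s.head? = some '+' then String.mk s.tail else String.mk s

def process_symbol_alt (symbol : String) : List String :=
  let l := symbol.toList
  let cuts := ((PySem.List.enumerate l 0).foldl psB_cutStep (0, [])).2
  PySem.Set.ofList ((psB_slices l 0 cuts).map psB_clean)

-- ===== PRECONDITION & SPEC =====
def Spec_process_symbol (symbol : String) (out : List String) : Prop := out = process_symbol_alt symbol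
instance (symbol : String) (out : List String) : Decidable (Spec_process_symbol symbol out) := by unfold Spec_process_symbol; infer_instance

-- ===== CLAIM (what is proved, stated in full; the proofs are below) =====
def Claim_equal_process_symbol : Prop := ∀ (symbol : String), Dom_process_symbol symbol → Spec_process_symbol symbol (process_symbol symbol)

-- ===== LEMMAS AND PROOFS =====

-- bracket depth contribution of one character
def psDelta (c : Char) : Int :=
  if c = '(' ∨ c = '{' ∨ c = '[' then 1
  else if c = ')' ∨ c = '}' ∨ c = ']' then -1 else 0

-- reference: raw segments (spaces kept, operator glued to the following segment)
def Sraw : Int → List Char → List (List Char)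
  | _, [] => [[]]
  | q, c :: cs =>
    if (c = '+' ∨ c = '-') ∧ q = 0 then
      [] :: (c :: (Sraw 0 cs).headI) :: (Sraw 0 cs).tail
    else (c :: (Sraw (q + psDelta c) cs).headI) :: (Sraw (q + psDelta c) cs).tail

-- reference: cut indices
def cutsR : Int → List Char → List Nat
  | _, [] => []
  | q, c :: cs =>
    if (c = '+' ∨ c = '-') ∧ q = 0 then 0 :: (cutsR 0 cs).map (· + 1)
    else (cutsR (q + psDelta c) cs).map (· + 1)

lemma Sraw_ne_nil (q : Int) (l : List Char) : Sraw q l ≠ [] := by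
  cases l <;> (simp [Sraw]; try split) <;> simp

lemma keyA (l : List Char) : ∀ (segs : List (List Char)) (now : List Char) (q : Int),
    (l.foldl psA_step (segs, now, q)).1 ++ [(l.foldl psA_step (segs, now, q)).2.1]
    = segs ++ (now ++ ((Sraw q l).headI.filter (fun c => c ≠ ' ')))
        :: ((Sraw q l).tail.map (List.filter (fun c => c ≠ ' '))) := by
  induction l with
  | nil => intro segs now q; simp [Sraw]
  | cons c cs ih =>
    intro segs now q
    by_cases hOp : c = '(' ∨ c = '{' ∨ c = '['
    · have h1 : ¬ (c = '+' ∨ c = '-') := by rcases hOp with h|h|h <;> subst h <;> decide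
      have h2 : ¬ (c = ')' ∨ c = '}' ∨ c = ']') := by rcases hOp with h|h|h <;> subst h <;> decide
      have h3 : ¬ c = ' ' := by rcases hOp with h|h|h <;> subst h <;> decide
      simp only [List.foldl_cons, psA_step, Sraw, psDelta, eq_true hOp, eq_false h1,
        eq_false h2, eq_false h3, if_true, if_false, false_and, ne_eq, not_false_eq_true,
        ite_true, ite_false]
      rw [ih]
      simp [List.filter_cons, h3, List.append_assoc, sub_eq_add_neg]
    · by_cases hCl : c = ')' ∨ c = '}' ∨ c = ']'
      · have h1 : ¬ (c = '+' ∨ c = '-') := by rcases hCl with h|h|h <;> subst h <;> decide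
        have h3 : ¬ c = ' ' := by rcases hCl with h|h|h <;> subst h <;> decide
        simp only [List.foldl_cons, psA_step, Sraw, psDelta, eq_true hCl, eq_false h1,
          eq_false hOp, eq_false h3, if_true, if_false, false_and, ne_eq, not_false_eq_true,
          ite_true, ite_false]
        rw [ih]
        simp [List.filter_cons, h3, List.append_assoc, sub_eq_add_neg]
      · by_cases hPM : c = '+' ∨ c = '-'
        · have h3 : ¬ c = ' ' := by rcases hPM with h|h <;> subst h <;> decide
          by_cases hq : q = 0
          · subst hq
            simp only [List.foldl_cons, psA_step, Sraw, psDelta, eq_true hPM, eq_false hOp,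
              eq_false hCl, eq_false h3, if_true, if_false, true_and, and_true, ne_eq,
              not_false_eq_true, ite_true, ite_false, eq_self_iff_true]
            rw [ih]
            simp [List.filter_cons, h3, List.append_assoc, sub_eq_add_neg]
          · have hq0 : (0 = q) = False := eq_false (fun h => hq h.symm)
            have hq0' : (q = 0) = False := eq_false hq
            simp only [List.foldl_cons, psA_step, Sraw, psDelta, eq_true hPM, eq_false hOp,
              eq_false hCl, eq_false h3, hq0, hq0', if_true, if_false, true_and, and_false,
              ne_eq, not_false_eq_true, ite_true, ite_false, add_zero]
            rw [ih]
            simp [List.filter_cons, h3, List.append_assoc, sub_eq_add_neg]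
        · by_cases hSp : c = ' '
          · simp only [List.foldl_cons, psA_step, Sraw, psDelta, eq_false hOp, eq_false hCl,
              eq_false hPM, eq_true hSp, if_true, if_false, false_and, ne_eq, not_true_eq_false,
              ite_true, ite_false, add_zero]
            rw [ih]
            have : ¬ (' ' : Char) ≠ ' ' := by decide
            subst hSp
            simp [List.filter_cons]
          · simp only [List.foldl_cons, psA_step, Sraw, psDelta, eq_false hOp, eq_false hCl,
              eq_false hPM, eq_false hSp, if_true, if_false, false_and, ne_eq,
              not_false_eq_true, ite_true, ite_false, add_zero]
            rw [ih]
            simp [List.filter_cons, hSp, List.append_assoc]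

lemma castShift (xs : List Nat) (k : Int) :
    (xs.map (· + 1)).map (fun n : Nat => (n:Int) + k) = xs.map (fun n : Nat => (n:Int) + (k + 1)) := by
  rw [List.map_map]
  apply List.map_congr_left
  intro a _
  simp only [Function.comp]
  push_cast
  ring

lemma keyCuts (l : List Char) : ∀ (k q : Int) (acc : List Int),
    ((PySem.List.enumerate l k).foldl psB_cutStep (q, acc)).2
    = acc ++ (cutsR q l).map (fun n : Nat => (n : Int) + k) := by
  induction l with
  | nil => intro k q acc; simp [cutsR, PySem.List.enumerate_nil]
  | cons c cs ih =>
    intro k q acc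
    rw [PySem.List.enumerate_cons, List.foldl_cons]
    by_cases hOp : c = '(' ∨ c = '{' ∨ c = '['
    · have h1 : ¬ (c = '+' ∨ c = '-') := by rcases hOp with h|h|h <;> subst h <;> decide
      simp only [psB_cutStep, cutsR, psDelta, eq_true hOp, eq_false h1, if_true, if_false,
        false_and, ite_true, ite_false]
      rw [ih, castShift]
    · by_cases hCl : c = ')' ∨ c = '}' ∨ c = ']'
      · have h1 : ¬ (c = '+' ∨ c = '-') := by rcases hCl with h|h|h <;> subst h <;> decide
        simp only [psB_cutStep, cutsR, psDelta, eq_true hCl, eq_false h1, eq_false hOp,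
          if_true, if_false, false_and, ite_true, ite_false, sub_eq_add_neg]
        rw [ih, castShift]
      · by_cases hPM : c = '+' ∨ c = '-'
        · by_cases hq : q = 0
          · subst hq
            simp only [psB_cutStep, cutsR, psDelta, eq_true hPM, eq_false hOp, eq_false hCl,
              if_true, if_false, true_and, and_true, ite_true, ite_false, eq_self_iff_true,
              List.map_cons]
            rw [ih, castShift]
            simp
          · have hq0' : (q = 0) = False := eq_false hq
            simp only [psB_cutStep, cutsR, psDelta, eq_true hPM, eq_false hOp, eq_false hCl,
              hq0', if_true, if_false, and_false, ite_true, ite_false, add_zero]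
            rw [ih, castShift]
        · simp only [psB_cutStep, cutsR, psDelta, eq_false hPM, eq_false hOp, eq_false hCl,
            if_true, if_false, false_and, ite_true, ite_false, add_zero]
          rw [ih, castShift]

lemma slice_from' (l : List Char) (p : Nat) :
    PySem.List.slice l (some ((p:Nat):Int)) none = l.drop p :=
  PySem.List.slice_from_natCast l p

lemma slice_from_succ (l : List Char) (p : Nat) :
    PySem.List.slice l (some (((p:Nat):Int) + 1)) none = l.drop (p + 1) := by
  rw [show ((p:Nat):Int) + 1 = (((p+1:Nat)):Int) by push_cast; ring]
  exact PySem.List.slice_from_natCast l (p+1)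

lemma slice_nat' (l : List Char) (a b : Nat) :
    PySem.List.slice l (some ((a:Nat):Int)) (some ((b:Nat):Int)) = (l.drop a).take (b - a) :=
  PySem.List.slice_natCast l a b

lemma slice_succ_succ (l : List Char) (a b : Nat) :
    PySem.List.slice l (some (((a:Nat):Int) + 1)) (some (((b:Nat):Int) + 1))
    = (l.drop (a+1)).take (b - a) := by
  rw [show ((a:Nat):Int) + 1 = (((a+1:Nat)):Int) by push_cast; ring,
      show ((b:Nat):Int) + 1 = (((b+1:Nat)):Int) by push_cast; ring,
      PySem.List.slice_natCast]
  congr 1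
  omega

lemma slices_shift (c : Char) (cs : List Char) :
    ∀ (cuts : List Nat) (p : Nat),
    psB_slices (c :: cs) (((p:Nat):Int) + 1) (cuts.map (fun n : Nat => (n:Int) + 1))
    = psB_slices cs ((p:Nat):Int) (cuts.map (fun n : Nat => (n:Int))) := by
  intro cuts
  induction cuts with
  | nil =>
    intro p
    simp only [List.map_nil, psB_slices, slice_from_succ, slice_from', List.drop_succ_cons]
  | cons b rest ih =>
    intro p
    simp only [List.map_cons, psB_slices, slice_succ_succ, slice_nat', List.drop_succ_cons]
    exact congrArg _ (ih b)

lemma slices_cons (c : Char) (cs : List Char) (cuts : List Nat) :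
    psB_slices (c :: cs) ((0:Nat):Int) (cuts.map (fun n : Nat => (n:Int) + 1))
    = (c :: (psB_slices cs ((0:Nat):Int) (cuts.map (fun n : Nat => (n:Int)))).headI)
      :: (psB_slices cs ((0:Nat):Int) (cuts.map (fun n : Nat => (n:Int)))).tail := by
  cases cuts with
  | nil => simp [psB_slices]
  | cons b rest =>
    simp only [List.map_cons, psB_slices]
    rw [show ((b:Nat):Int) + 1 = (((b+1:Nat)):Int) by push_cast; ring]
    rw [slice_nat', slice_nat']
    rw [show (((b+1:Nat)):Int) = ((b:Nat):Int) + 1 by push_cast; ring]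
    rw [slices_shift]
    simp [List.take_succ_cons]

lemma map_cast_succ (xs : List Nat) :
    (xs.map (· + 1)).map (fun n : Nat => (n:Int)) = xs.map (fun n : Nat => (n:Int) + 1) := by
  simp [List.map_map, Function.comp]

lemma keySlices (l : List Char) : ∀ (q : Int),
    psB_slices l ((0:Nat):Int) ((cutsR q l).map (fun n : Nat => (n:Int))) = Sraw q l := by
  induction l with
  | nil => intro q; simp [cutsR, Sraw, psB_slices]
  | cons c cs ih =>
    intro q
    by_cases h : (c = '+' ∨ c = '-') ∧ q = 0
    · simp only [cutsR, Sraw, if_pos h, List.map_cons, map_cast_succ, psB_slices]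
      rw [slices_cons, ih]
      rw [slice_nat']
      simp
    · simp only [cutsR, Sraw, if_neg h, map_cast_succ]
      rw [slices_cons, ih]

-- ===== VERDICT (by name: the statement is the Claim_ definition above) =====
theorem process_symbol_spec : Claim_equal_process_symbol := by
  intro symbol _
  show Spec_process_symbol symbol (process_symbol symbol)
  unfold Spec_process_symbol
  have hA := keyA symbol.toList [] [] 0
  have hC := keyCuts symbol.toList 0 0 []
  have hSl := keySlices symbol.toList 0
  simp only [List.nil_append] at hA
  simp only [List.nil_append] at hC
  have hmap : (cutsR 0 symbol.toList).map (fun n : Nat => (n : Int) + 0)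
      = (cutsR 0 symbol.toList).map (fun n : Nat => (n : Int)) :=
    List.map_congr_left (by intro a _; ring)
  rw [hmap] at hC
  rw [show ((0:Nat):Int) = (0:Int) from by simp] at hSl
  simp only [process_symbol, process_symbol_alt]
  rw [hC, hSl, hA]
  obtain ⟨x, xs, hS⟩ := List.exists_cons_of_ne_nil (Sraw_ne_nil 0 symbol.toList)
  rw [hS]
  simp only [List.map_cons, List.map_map, psB_clean]
  congr 2
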